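-- pv_equiv track=rewrite | github.com/SpankoWhat/Challanges | SubmssionFile/logParser.py | formatHelper
-- ===== SOURCE A (Python) =====
-- def formatHelper(input):
--     textOuput = ''
--     goNext = 0
--     for line in input:
--         if goNext == 2:
--             textOuput +="\n"
--             goNext = 0
--         goNext += 1
--         textOuput += line + " "
--     return textOuput
-- ===== SOURCE B (Python) =====
-- def formatHelper(input):
--     lines = list(input)
--     chunks = [lines[i:i + 2] for i in range(0, len(lines), 2)]
--     return "\n".join("".join(line + " " for line in chunk) for chunk in chunks)
-- ===== Notes on version B (the rewrite author's own statement) =====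
-- stated objective: simpler
-- what changed: A's single loop with a stateful goNext counter that injects a newline mid-iteration is replaced by grouping the lines into consecutive pairs (chunks of two) and joining the per-chunk texts with '\n'.
import Mathlib
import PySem

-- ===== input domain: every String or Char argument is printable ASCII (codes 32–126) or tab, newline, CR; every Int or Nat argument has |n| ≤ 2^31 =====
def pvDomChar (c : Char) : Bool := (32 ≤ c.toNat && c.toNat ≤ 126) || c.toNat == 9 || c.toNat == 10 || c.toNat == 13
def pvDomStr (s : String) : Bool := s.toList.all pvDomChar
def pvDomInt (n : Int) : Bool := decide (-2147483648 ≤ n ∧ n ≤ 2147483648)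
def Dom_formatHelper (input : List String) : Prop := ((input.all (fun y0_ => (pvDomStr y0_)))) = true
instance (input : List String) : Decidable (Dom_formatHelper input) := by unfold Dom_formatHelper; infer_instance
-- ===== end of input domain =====

-- B rewrites A's stateful counter loop as group-into-pairs then join; objective: simpler decomposition.

-- ===== PORT A =====
-- literal port of A: fold over the lines, carrying (textOuput, goNext)
def formatHelperStep (st : String × Int) (line : String) : String × Int :=
  let st := if st.2 == 2 then (st.1 ++ "\n", (0 : Int)) else st
  (st.1 ++ line ++ " ", st.2 + 1)

def formatHelper (input : List String) : String :=
  (input.foldl formatHelperStep ("", 0)).1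

-- ===== PORT B =====
-- chunks of two consecutive lines (Source B's lines[i:i+2] for i in range(0, len, 2))
def chunks2 : List String → List (List String)
  | [] => []
  | [a] => [[a]]
  | a :: b :: rest => [a, b] :: chunks2 rest

-- str.join ported by hand (exact: empty list → "", separator between consecutive elements)
def joinWith (sep : String) : List String → String
  | [] => ""
  | [a] => a
  | a :: b :: rest => a ++ sep ++ joinWith sep (b :: rest)

def formatHelper_alt (input : List String) : String :=
  joinWith "\n" ((chunks2 input).map fun c => joinWith "" (c.map (fun line => line ++ " ")))

-- ===== PRECONDITION & SPEC =====
def Spec_formatHelper (input : List String) (out : String) : Prop := out = formatHelper_alt input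
instance (input : List String) (out : String) : Decidable (Spec_formatHelper input out) := by unfold Spec_formatHelper; infer_instance

-- ===== CLAIM (what is proved, stated in full; the proofs are below) =====
def Claim_equal_formatHelper : Prop := ∀ (input : List String), Dom_formatHelper input → Spec_formatHelper input (formatHelper input)

-- ===== LEMMAS AND PROOFS =====

theorem sp_nl : (" " : String) ++ "\n" = " \n" := rfl

theorem joinWith_cons_of_ne (sep x : String) (l : List String) (h : l ≠ []) :
    joinWith sep (x :: l) = x ++ sep ++ joinWith sep l := by
  cases l with
  | nil => exact absurd rfl h
  | cons y ys => rfl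

theorem chunks2_cons_ne_nil (c : String) (cs : List String) : chunks2 (c :: cs) ≠ [] := by
  cases cs <;> simp [chunks2]

-- A's fold from counter 0, with an arbitrary accumulated text prefix
theorem foldA_from_zero (input : List String) : ∀ (t : String),
    (input.foldl formatHelperStep (t, 0)).1 = t ++ formatHelper_alt input := by
  induction input using chunks2.induct with
  | case1 =>
      intro t
      simp [formatHelper_alt, chunks2, joinWith]
  | case2 a =>
      intro t
      simp [formatHelper_alt, chunks2, joinWith, formatHelperStep, String.append_assoc]
  | case3 a b rest ih =>
      intro t
      cases rest with
      | nil =>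
          simp [formatHelper_alt, chunks2, joinWith, formatHelperStep,
            String.append_assoc]
      | cons c cs =>
          have h2 : ((a :: b :: c :: cs).foldl formatHelperStep (t, 0))
              = ((c :: cs).foldl formatHelperStep (t ++ a ++ " " ++ b ++ " " ++ "\n", 0)) := by
            simp [formatHelperStep]
          rw [h2, ih]
          have hne : (chunks2 (c :: cs)).map
              (fun ch => joinWith "" (ch.map (fun line => line ++ " "))) ≠ [] := by
            simpa using chunks2_cons_ne_nil c cs
          simp only [formatHelper_alt, chunks2, List.map_cons, joinWith]
          rw [joinWith_cons_of_ne _ _ _ hne]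
          simp [joinWith, ← sp_nl, String.append_assoc]

-- ===== VERDICT (by name: the statement is the Claim_ definition above) =====
theorem formatHelper_spec : Claim_equal_formatHelper := by
  intro input _
  show formatHelper input = formatHelper_alt input
  have := foldA_from_zero input ""
  simpa [formatHelper] using this
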